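-- pv_equiv track=rewrite | github.com/ynshen/Landscape | src/landscape/visualization.py | markers
-- ===== SOURCE A (Python) =====
-- def markers(num=5, with_line=False):
--     from math import ceil
--
--     full_marker_list = ['o', '^', 's', '+', 'x', 'D', 'v', '1', 'p', 'H']
--     marker_list = []
--     for i in range(ceil(num/10)):
--         marker_list += full_marker_list
--     if with_line:
--         return ['-' + marker for marker in marker_list[:num]]
--     else:
--         return marker_list[:num]
-- ===== SOURCE B (Python) =====
-- def markers(num=5, with_line=False):
--     full_marker_list = ['o', '^', 's', '+', 'x', 'D', 'v', '1', 'p', 'H']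
--     return [('-' + full_marker_list[i % 10]) if with_line else full_marker_list[i % 10]
--             for i in range(num)]
-- ===== Notes on version B (the rewrite author's own statement) =====
-- stated objective: simpler
-- what changed: B fills each output position directly with full_marker_list[i % 10] in one comprehension over range(num), instead of over-allocating ceil(num/10) copies of the palette and slicing; no math import, no intermediate list.
import Mathlib
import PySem

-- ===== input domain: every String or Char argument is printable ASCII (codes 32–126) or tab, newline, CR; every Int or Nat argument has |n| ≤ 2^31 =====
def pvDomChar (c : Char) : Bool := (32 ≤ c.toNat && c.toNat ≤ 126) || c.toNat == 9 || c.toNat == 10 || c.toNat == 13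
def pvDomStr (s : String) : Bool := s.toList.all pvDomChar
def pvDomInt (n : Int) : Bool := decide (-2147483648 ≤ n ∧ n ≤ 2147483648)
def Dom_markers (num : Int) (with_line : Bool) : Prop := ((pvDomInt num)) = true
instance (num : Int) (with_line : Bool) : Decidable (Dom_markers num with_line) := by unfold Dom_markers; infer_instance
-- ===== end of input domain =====

-- B iterates over the num output positions directly (palette[i % 10]) instead of padding with
-- ceil(num/10) palette copies and slicing: simpler, no math import. Equivalence is exact.

-- the palette constant shared by both ports
def pvFull : List String := ["o", "^", "s", "+", "x", "D", "v", "1", "p", "H"]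

-- ===== PORT A =====
def markers (num : Int) (with_line : Bool) : List String :=
  let full_marker_list : List String := pvFull
  -- math.ceil(num/10) is exact ceiling division here: -((-num) // 10)
  let marker_list : List String :=
    (PySem.List.pyRange 0 (-(PySem.Int.floordiv (-num) 10)) 1).foldl
      (fun acc _ => acc ++ full_marker_list) []
  if with_line then
    (PySem.List.slice marker_list none (some num)).map (fun marker => "-" ++ marker)
  else
    PySem.List.slice marker_list none (some num)

-- ===== PORT B =====
def markers_alt (num : Int) (with_line : Bool) : List String :=
  let full_marker_list : List String := pvFull
  (PySem.List.pyRange 0 num 1).map (fun i =>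
    let m := (PySem.List.pyGet? full_marker_list (PySem.Int.mod i 10)).getD ""
    if with_line then "-" ++ m else m)

-- ===== PRECONDITION & SPEC =====
def Spec_markers (num : Int) (with_line : Bool) (out : List String) : Prop := out = markers_alt num with_line
instance (num : Int) (with_line : Bool) (out : List String) : Decidable (Spec_markers num with_line out) := by unfold Spec_markers; infer_instance

-- ===== CLAIM (what is proved, stated in full; the proofs are below) =====
def Claim_equal_markers : Prop := ∀ (num : Int) (with_line : Bool), Dom_markers num with_line → Spec_markers num with_line (markers num with_line)

-- ===== LEMMAS AND PROOFS =====

-- A's loop is m concatenated copies of the palette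
def pvRep : Nat → List String
  | 0 => []
  | m + 1 => pvRep m ++ pvFull

theorem pvRep_length (m : Nat) : (pvRep m).length = 10 * m := by
  induction m with
  | zero => rfl
  | succ m ih => simp [pvRep, ih, pvFull]; omega

theorem pvRep_range (m : Nat) :
    (List.range m).foldl (fun (acc : List String) _ => acc ++ pvFull) [] = pvRep m := by
  induction m with
  | zero => rfl
  | succ m ih => rw [List.range_succ, List.foldl_append, ih]; rfl

theorem pvRep_loop (n : Int) :
    (PySem.List.pyRange 0 n 1).foldl (fun acc _ => acc ++ pvFull) [] = pvRep n.toNat := by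
  rw [PySem.List.pyRange_one, List.foldl_map]
  simpa using pvRep_range (n - 0).toNat

theorem pvRep_getElem? (m k : Nat) (hk : k < 10 * m) :
    (pvRep m)[k]? = pvFull[k % 10]? := by
  induction m with
  | zero => omega
  | succ m ih =>
    by_cases h : k < 10 * m
    · rw [pvRep, List.getElem?_append_left (by rw [pvRep_length]; omega), ih h]
    · rw [pvRep, List.getElem?_append_right (by rw [pvRep_length]; omega), pvRep_length]
      congr 1
      omega

theorem pvRep_take (M N : Nat) (h : N ≤ 10 * M) :
    (pvRep M).take N = (List.range N).map (fun k => (pvFull[k % 10]?).getD "") := by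
  apply List.ext_getElem?
  intro i
  by_cases hi : i < N
  · have h10 : i % 10 < 10 := Nat.mod_lt _ (by omega)
    rw [List.getElem?_take_of_lt hi, pvRep_getElem? M i (by omega),
        List.getElem?_map, List.getElem?_range hi]
    simp [List.getElem?_eq_getElem (by simpa [pvFull] using h10 : i % 10 < pvFull.length)]
  · rw [List.getElem?_eq_none, List.getElem?_eq_none]
    · simpa using hi
    · simp [pvRep_length]; omega

def pvOut (num : Int) (wl : Bool) : List String :=
  (List.range num.toNat).map
    (fun k => if wl then "-" ++ (pvFull[k % 10]?).getD "" else (pvFull[k % 10]?).getD "")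

theorem A_eval (num : Int) (wl : Bool) : markers num wl = pvOut num wl := by
  simp only [markers, pvOut]
  rw [pvRep_loop]
  by_cases hpos : 0 < num
  · have hq := (PySem.Int.neg_floordiv_neg_eq_iff_of_pos (a := num) (b := 10)
      (q := -(PySem.Int.floordiv (-num) 10)) (by omega)).mp rfl
    have hs : ∀ xs : List String, PySem.List.slice xs none (some num) = xs.take num.toNat :=
      fun xs => PySem.List.slice_to xs (by omega)
    rw [hs, pvRep_take _ num.toNat (by omega)]
    cases wl <;> simp [List.map_map]
  · have hq := (PySem.Int.neg_floordiv_neg_eq_iff_of_pos (a := num) (b := 10)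
      (q := -(PySem.Int.floordiv (-num) 10)) (by omega)).mp rfl
    have h0 : (-(PySem.Int.floordiv (-num) 10)).toNat = 0 := by omega
    rw [h0, show num.toNat = 0 from by omega]
    cases wl <;> simp [pvRep, PySem.List.slice, PySem.List.clampIdx]

theorem B_eval (num : Int) (wl : Bool) : markers_alt num wl = pvOut num wl := by
  simp only [markers_alt, pvOut]
  rw [PySem.List.pyRange_one, Int.sub_zero, List.map_map]
  apply List.map_congr_left
  intro k hk
  simp only [Function.comp_apply, zero_add]
  have hmod : PySem.Int.mod ((k : Nat) : Int) 10 = ((k % 10 : Nat) : Int) := by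
    exact_mod_cast PySem.Int.mod_natCast k 10
  rw [hmod]
  have hj : k % 10 < 10 := Nat.mod_lt _ (by omega)
  generalize k % 10 = j at hj
  interval_cases j <;> cases wl <;> rfl

-- ===== VERDICT (by name: the statement is the Claim_ definition above) =====
theorem markers_spec : Claim_equal_markers := by
  intro num with_line _
  unfold Spec_markers
  rw [A_eval, B_eval]
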